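-- pv_equiv track=rewrite | github.com/SegniDessalegn/competitive-programming | 0992-subarrays-with-k-different-integers/0992-subarrays-with-k-different-integers.py | count_greater
-- ===== SOURCE A (Python) =====
-- def count_greater(nums, k):
--     left = 0
--     right = 0
--     count = {}
--     ans = 0
--     while right < len(nums):
--         count[nums[right]] = count.get(nums[right], 0) + 1
--         while len(count) > k:
--             count[nums[left]] -= 1
--             if count[nums[left]] == 0:
--                 count.pop(nums[left])
--             ans += len(nums) - right
--             left += 1
--         right += 1
--
--     return ans
-- ===== SOURCE B (Python) =====
-- def count_greater(nums, k):
--     n = len(nums)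
--     ans = 0
--     for l in range(n):
--         seen = set()
--         for r in range(l, n):
--             seen.add(nums[r])
--             if len(seen) > k:
--                 ans += n - r
--                 break
--     return ans
-- ===== Notes on version B (the rewrite author's own statement) =====
-- stated objective: alternative
-- what changed: B drops A's amortized two-pointer window with a frequency dict entirely: for each start index l it runs an independent fresh scan with a plain set until the window exceeds k distinct values, adds n - r and breaks; there is no left pointer, no counts and no shrink loop.
import Mathlib
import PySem

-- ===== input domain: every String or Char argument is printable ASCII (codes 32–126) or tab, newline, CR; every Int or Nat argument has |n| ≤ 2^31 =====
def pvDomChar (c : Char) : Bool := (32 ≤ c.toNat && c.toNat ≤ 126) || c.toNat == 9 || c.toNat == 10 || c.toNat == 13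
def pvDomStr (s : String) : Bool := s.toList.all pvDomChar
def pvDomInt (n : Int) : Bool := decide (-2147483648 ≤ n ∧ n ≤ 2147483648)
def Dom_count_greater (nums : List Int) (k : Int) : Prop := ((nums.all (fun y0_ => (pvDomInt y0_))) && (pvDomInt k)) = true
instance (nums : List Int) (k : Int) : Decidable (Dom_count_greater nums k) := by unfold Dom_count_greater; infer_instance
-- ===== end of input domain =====

-- B replaces A's amortized two-pointer window (frequency dict, shrink loop) by an independent
-- fresh set-scan per start index with early break (alternative decomposition, not faster).


-- ===== PORT A =====
-- inner 'while len(count) > k': count[nums[left]] -= 1; pop on zero; ans += len(nums) - right;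
-- left += 1.  Fueled (fuel = len+1 always suffices inside Pre_); lookups use getD 0 where the
-- Python would raise KeyError/IndexError — those inputs are excluded by Pre_count_greater.
def cgInnerA (nums : List Int) (k : Int) : Nat → Int → PySem.Dict Int Int → Int → Nat →
    Int × PySem.Dict Int Int × Int
  | 0, left, count, ans, _ => (left, count, ans)
  | fuel + 1, left, count, ans, right =>
    if (count.size : Int) > k then
      let x := (PySem.List.pyGet? nums left).getD 0
      let count1 := count.insert x (count.getD x 0 - 1)
      let count2 := if count1.getD x 0 == 0 then count1.erase x else count1
      cgInnerA nums k fuel (left + 1) count2 (ans + ((nums.length : Int) - (right : Int))) right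
    else (left, count, ans)

-- outer 'while right < len(nums)' of A
def cgOuterA (nums : List Int) (k : Int) : Nat → Int → PySem.Dict Int Int → Int → Nat → Int
  | 0, _, _, ans, _ => ans
  | fuel + 1, left, count, ans, right =>
    if right < nums.length then
      let x := nums.getD right 0
      let count1 := count.insert x (count.getD x 0 + 1)
      let (left', count', ans') := cgInnerA nums k (nums.length + 1) left count1 ans right
      cgOuterA nums k fuel left' count' ans' (right + 1)
    else ans

def count_greater (nums : List Int) (k : Int) : Int :=
  cgOuterA nums k nums.length 0 PySem.Dict.empty 0 0

-- ===== PORT B =====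
-- B's inner 'for r in range(l, n)': seen.add(nums[r]); if len(seen) > k: ans += n - r; break.
-- Fuel counts the remaining indices l..n-1; running out of fuel is the loop ending without break.
def cgScanB (nums : List Int) (k : Int) : Nat → Nat → PySem.Set Int → Int
  | 0, _, _ => 0
  | fuel + 1, r, seen =>
    if ((PySem.Set.add seen (nums.getD r 0)).length : Int) > k then
      (nums.length : Int) - (r : Int)
    else cgScanB nums k fuel (r + 1) (PySem.Set.add seen (nums.getD r 0))

-- B's outer 'for l in range(n)' accumulating into ans
def count_greater_alt (nums : List Int) (k : Int) : Int :=
  (List.range nums.length).foldl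
    (fun ans l => ans + cgScanB nums k (nums.length - l) l PySem.Set.empty) 0

-- ===== PRECONDITION & SPEC =====
-- Pre_ excludes exactly the inputs where the Python A raises (IndexError/KeyError while
-- shrinking an already-empty window): a negative k with a nonempty list.
def Pre_count_greater (nums : List Int) (k : Int) : Prop := nums = [] ∨ 0 ≤ k
instance (nums : List Int) (k : Int) : Decidable (Pre_count_greater nums k) := by
  unfold Pre_count_greater; infer_instance
def pvWitness_count_greater : List Int × Int := ([1, 2, 1, 3], 1)

def Spec_count_greater (nums : List Int) (k : Int) (out : Int) : Prop := out = count_greater_alt nums k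
instance (nums : List Int) (k : Int) (out : Int) : Decidable (Spec_count_greater nums k out) := by
  unfold Spec_count_greater; infer_instance

-- ===== CLAIM (what is proved, stated in full; the proofs are below) =====
def Claim_equal_count_greater : Prop := ∀ (nums : List Int) (k : Int), Dom_count_greater nums k → Pre_count_greater nums k → Spec_count_greater nums k (count_greater nums k)

-- ===== LEMMAS AND PROOFS =====

-- `seg nums l r` is the window nums[l:r]; `dct` its number of distinct values.
def seg (nums : List Int) (l r : Nat) : List Int := (nums.take r).drop l
def dct (nums : List Int) (l r : Nat) : Nat := (seg nums l r).toFinset.card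

-- abstract form of B's inner scan, driven by dct instead of the concrete set
def bA (nums : List Int) (k : Int) (l : Nat) : Nat → Nat → Int
  | 0, _ => 0
  | fuel + 1, r =>
    if (dct nums l (r + 1) : Int) > k then (nums.length : Int) - (r : Int)
    else bA nums k l fuel (r + 1)

def bVal (nums : List Int) (k : Int) (l : Nat) : Int := bA nums k l (nums.length - l) l

-- abstract form of A's loops, driven by dct instead of the concrete dict
def aInner (nums : List Int) (k : Int) : Nat → Nat → Nat → Int → Nat × Int
  | 0, _, left, ans => (left, ans)
  | fuel + 1, R, left, ans =>
    if (dct nums left (R + 1) : Int) > k then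
      aInner nums k fuel R (left + 1) (ans + ((nums.length : Int) - (R : Int)))
    else (left, ans)

def aOuter (nums : List Int) (k : Int) : Nat → Nat → Nat → Int → Int
  | 0, _, _, ans => ans
  | fuel + 1, R, left, ans =>
    if R < nums.length then
      aOuter nums k fuel (R + 1) (aInner nums k (nums.length + 1) R left ans).1
        (aInner nums k (nums.length + 1) R left ans).2
    else ans

-- the dict is an exact multiset counter of the window
def CtrInv (d : PySem.Dict Int Int) (w : List Int) : Prop :=
  d.keys.Nodup ∧ (∀ x : Int, d.getD x 0 = (w.count x : Int)) ∧ (∀ x : Int, x ∈ d.keys ↔ x ∈ w)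

theorem seg_eq_nil {nums : List Int} {l r : Nat} (h : r ≤ l ∨ nums.length ≤ l) :
    seg nums l r = [] := by
  apply List.drop_eq_nil_of_le
  simp only [List.length_take]
  omega

theorem seg_append {nums : List Int} {l r : Nat} (hlr : l ≤ r) (hr : r < nums.length) :
    seg nums l (r + 1) = seg nums l r ++ [nums.getD r 0] := by
  unfold seg
  rw [List.take_add_one, List.getElem?_eq_getElem hr,
    List.drop_append_of_le_length (by simp; omega)]
  simp [List.getD_eq_getElem?_getD, List.getElem?_eq_getElem hr]

theorem seg_cons {nums : List Int} {l r : Nat} (hl : l < nums.length) (hlr : l < r) :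
    seg nums l r = nums.getD l 0 :: seg nums (l + 1) r := by
  unfold seg
  rw [List.drop_eq_getElem_cons (by simp; omega)]
  simp [List.getElem_take, List.getD_eq_getElem?_getD, List.getElem?_eq_getElem hl]

theorem dct_mono_r {nums : List Int} {l r r' : Nat} (h : r ≤ r') :
    dct nums l r ≤ dct nums l r' := by
  apply Finset.card_le_card
  have hseg : seg nums l r = (seg nums l r').take (r - l) := by
    unfold seg
    rw [List.drop_take, List.drop_take, List.take_take]
    congr 1
    omega
  rw [hseg]
  intro x hx
  rw [List.mem_toFinset] at hx ⊢
  exact (List.take_sublist _ _).subset hx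

theorem dct_mono_l {nums : List Int} {l l' r : Nat} (h : l ≤ l') :
    dct nums l' r ≤ dct nums l r := by
  apply Finset.card_le_card
  have hseg : seg nums l' r = (seg nums l r).drop (l' - l) := by
    unfold seg
    rw [List.drop_drop]
    congr 1
    omega
  rw [hseg]
  intro x hx
  rw [List.mem_toFinset] at hx ⊢
  exact (List.drop_sublist _ _).subset hx

-- a Nodup list with the same members as w has length = number of distinct values of w
theorem nodup_mem_card (s w : List Int) (hnd : s.Nodup) (hm : ∀ x, x ∈ s ↔ x ∈ w) :
    s.length = w.toFinset.card := by
  rw [← List.toFinset_card_of_nodup hnd]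
  congr 1
  ext x
  simp only [List.mem_toFinset]
  exact hm x

-- window nonempty when it has a distinct value
theorem dct_pos {nums : List Int} {l r : Nat} (h : 0 < dct nums l r) :
    l < r ∧ l < nums.length := by
  by_contra hc
  rw [not_and_or, not_lt, not_lt] at hc
  have : seg nums l r = [] := seg_eq_nil hc
  unfold dct at h
  rw [this] at h
  simp at h

-- ---- small Dict.erase facts (not in the PySem book) ----
theorem find?_filter_ne {x y : Int} (h : x ≠ y) (L : List (Int × Int)) :
    (L.filter (fun p => !(p.1 == y))).find? (fun p => p.1 == x) = L.find? (fun p => p.1 == x) := by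
  induction L with
  | nil => rfl
  | cons p t ih =>
    by_cases hq : p.1 = y
    · have hpx : (p.1 == x) = false := beq_eq_false_iff_ne.mpr (by rw [hq]; exact Ne.symm h)
      rw [List.filter_cons, if_neg (by simp [hq]), ih, List.find?_cons_of_neg (by simp [hpx])]
    · rw [List.filter_cons, if_pos (by simp [hq])]
      by_cases hp : p.1 = x
      · rw [List.find?_cons_of_pos (by simp [hp]), List.find?_cons_of_pos (by simp [hp])]
      · rw [List.find?_cons_of_neg (by simp [hp]), List.find?_cons_of_neg (by simp [hp]), ih]

theorem dict_get?_erase_self (d : PySem.Dict Int Int) (y : Int) :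
    (d.erase y).get? y = none := by
  simp only [PySem.Dict.erase, PySem.Dict.get?]
  rw [List.find?_eq_none.mpr]
  · rfl
  · intro p hp
    simp only [List.mem_filter] at hp
    simpa using hp.2

theorem dict_get?_erase_of_ne (d : PySem.Dict Int Int) {x y : Int} (h : x ≠ y) :
    (d.erase y).get? x = d.get? x := by
  simp only [PySem.Dict.erase, PySem.Dict.get?]
  rw [find?_filter_ne h]

theorem dict_keys_erase (d : PySem.Dict Int Int) (y : Int) :
    (d.erase y).keys = d.keys.filter (fun x => !(x == y)) := by
  simp only [PySem.Dict.erase, PySem.Dict.keys, List.filter_map]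
  rfl

theorem dict_size_keys (d : PySem.Dict Int Int) : d.size = d.keys.length := by
  simp [PySem.Dict.size, PySem.Dict.keys]

theorem ctrinv_size {d : PySem.Dict Int Int} {w : List Int} (h : CtrInv d w) :
    d.size = w.toFinset.card := by
  rw [dict_size_keys]
  exact nodup_mem_card _ _ h.1 h.2.2

-- the add step of A's outer loop preserves the counter invariant
theorem ctr_grow {d : PySem.Dict Int Int} {w : List Int} (h : CtrInv d w) (x : Int) :
    CtrInv (d.insert x (d.getD x 0 + 1)) (w ++ [x]) := by
  obtain ⟨hnd, hcnt, hmem⟩ := h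
  refine ⟨PySem.Dict.nodup_keys_insert _ _ _ hnd, ?_, ?_⟩
  · intro z
    rw [PySem.Dict.getD_insert]
    by_cases hz : z = x
    · subst hz
      simp [hcnt z, List.count_append]
    · simp [hz, hcnt z, List.count_append, Ne.symm hz]
  · intro z
    rw [PySem.Dict.mem_keys_insert]
    simp only [List.mem_append, List.mem_singleton, hmem z]
    tauto

-- the shrink step of A's inner loop: remove one occurrence of the window's head
theorem ctr_shrink {d : PySem.Dict Int Int} {y : Int} {t : List Int} (h : CtrInv d (y :: t)) :
    CtrInv (if (d.insert y (d.getD y 0 - 1)).getD y 0 == 0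
            then (d.insert y (d.getD y 0 - 1)).erase y
            else d.insert y (d.getD y 0 - 1)) t := by
  obtain ⟨hnd, hcnt, hmem⟩ := h
  have hy : d.getD y 0 - 1 = (t.count y : Int) := by
    rw [hcnt y, List.count_cons_self]
    push_cast
    ring
  have h1 : (d.insert y (d.getD y 0 - 1)).getD y 0 = (t.count y : Int) := by
    rw [PySem.Dict.getD_insert_self, hy]
  by_cases h0 : t.count y = 0
  · have hyt : y ∉ t := List.count_eq_zero.mp h0
    rw [if_pos (by simp [h1, h0])]
    refine ⟨?_, ?_, ?_⟩
    · rw [dict_keys_erase]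
      exact (PySem.Dict.nodup_keys_insert _ _ _ hnd).filter _
    · intro z
      rw [PySem.Dict.getD_eq_get?_getD]
      by_cases hz : z = y
      · subst hz
        rw [dict_get?_erase_self]
        simp [h0]
      · rw [dict_get?_erase_of_ne _ hz, ← PySem.Dict.getD_eq_get?_getD,
          PySem.Dict.getD_insert_of_ne _ _ _ hz, hcnt z, List.count_cons_of_ne (Ne.symm hz)]
    · intro z
      rw [dict_keys_erase]
      simp only [List.mem_filter, PySem.Dict.mem_keys_insert, hmem z]
      constructor
      · rintro ⟨hz1, hz2⟩
        simp at hz2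
        rcases hz1 with hz1 | hz1
        · exact absurd hz1 hz2
        · rcases List.mem_cons.mp hz1 with hz | hz
          · exact absurd hz hz2
          · exact hz
      · intro hz
        refine ⟨Or.inr (List.mem_cons_of_mem _ hz), by simp; rintro rfl; exact hyt hz⟩
  · rw [if_neg (by simp [h1, h0])]
    have hyt : y ∈ t := by
      by_contra hc
      exact h0 (List.count_eq_zero.mpr hc)
    refine ⟨PySem.Dict.nodup_keys_insert _ _ _ hnd, ?_, ?_⟩
    · intro z
      by_cases hz : z = y
      · subst hz
        rw [PySem.Dict.getD_insert_self, hy]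
      · rw [PySem.Dict.getD_insert_of_ne _ _ _ hz, hcnt z, List.count_cons_of_ne (Ne.symm hz)]
    · intro z
      rw [PySem.Dict.mem_keys_insert, hmem z]
      constructor
      · rintro (rfl | hz)
        · exact hyt
        · rcases List.mem_cons.mp hz with rfl | hz
          · exact hyt
          · exact hz
      · intro hz
        exact Or.inr (List.mem_cons_of_mem _ hz)

-- B's concrete scan computes the abstract scan
theorem bridgeB (nums : List Int) (k : Int) :
    ∀ (fuel r : Nat) (seen : PySem.Set Int) (l : Nat), l ≤ r → r + fuel ≤ nums.length →
      seen.Nodup → (∀ x, x ∈ seen ↔ x ∈ seg nums l r) →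
      cgScanB nums k fuel r seen = bA nums k l fuel r := by
  intro fuel
  induction fuel with
  | zero => intro r seen l _ _ _ _; rfl
  | succ f ih =>
    intro r seen l hlr hrf hnd hm
    have hr : r < nums.length := by omega
    have hseg := seg_append hlr hr
    have hm' : ∀ z, z ∈ PySem.Set.add seen (nums.getD r 0) ↔ z ∈ seg nums l (r + 1) := by
      intro z
      rw [PySem.Set.mem_add, hseg]
      simp [hm z]
    have hnd' : (PySem.Set.add seen (nums.getD r 0)).Nodup := PySem.Set.nodup_add _ _ hnd
    have hlen : (PySem.Set.add seen (nums.getD r 0)).length = dct nums l (r + 1) :=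
      nodup_mem_card _ _ hnd' hm'
    simp only [cgScanB, bA, hlen]
    split
    · rfl
    · exact ih (r + 1) _ l (by omega) (by omega) hnd' hm'

-- A's concrete inner loop computes the abstract inner loop (and keeps the invariant)
theorem innerA_corr (nums : List Int) (k : Int) (hk : 0 ≤ k) :
    ∀ (fuel : Nat) (leftN : Nat) (count : PySem.Dict Int Int) (ans : Int) (R : Nat),
      leftN ≤ R + 1 → R < nums.length → CtrInv count (seg nums leftN (R + 1)) →
      ∃ d', cgInnerA nums k fuel (leftN : Int) count ans R =
          (((aInner nums k fuel R leftN ans).1 : Int), d', (aInner nums k fuel R leftN ans).2)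
        ∧ CtrInv d' (seg nums (aInner nums k fuel R leftN ans).1 (R + 1))
        ∧ leftN ≤ (aInner nums k fuel R leftN ans).1
        ∧ (aInner nums k fuel R leftN ans).1 ≤ R + 1 := by
  intro fuel
  induction fuel with
  | zero =>
    intro leftN count ans R h1 _ hinv
    exact ⟨count, rfl, hinv, le_refl _, h1⟩
  | succ f ih =>
    intro leftN count ans R h1 hR hinv
    have hsize : (count.size : Int) = (dct nums leftN (R + 1) : Int) := by
      rw [ctrinv_size hinv]; rfl
    by_cases hcond : (dct nums leftN (R + 1) : Int) > k
    · have hpos : 0 < dct nums leftN (R + 1) := by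
        rcases Nat.eq_zero_or_pos (dct nums leftN (R + 1)) with h | h
        · rw [h] at hcond; norm_num at hcond; omega
        · exact h
      obtain ⟨hlr, hln⟩ := dct_pos hpos
      have hy : (PySem.List.pyGet? nums (leftN : Int)).getD 0 = nums.getD leftN 0 := by
        rw [PySem.List.pyGet?_natCast, List.getD_eq_getElem?_getD]
      have hsegc := seg_cons hln hlr
      have hinv' : CtrInv (if (count.insert (nums.getD leftN 0) (count.getD (nums.getD leftN 0) 0 - 1)).getD (nums.getD leftN 0) 0 == 0
            then (count.insert (nums.getD leftN 0) (count.getD (nums.getD leftN 0) 0 - 1)).erase (nums.getD leftN 0)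
            else count.insert (nums.getD leftN 0) (count.getD (nums.getD leftN 0) 0 - 1))
          (seg nums (leftN + 1) (R + 1)) := by
        apply ctr_shrink
        rw [← hsegc]
        exact hinv
      have hstepA : cgInnerA nums k (f + 1) (leftN : Int) count ans R =
          cgInnerA nums k f ((leftN : Int) + 1)
            (if (count.insert (nums.getD leftN 0) (count.getD (nums.getD leftN 0) 0 - 1)).getD (nums.getD leftN 0) 0 == 0
             then (count.insert (nums.getD leftN 0) (count.getD (nums.getD leftN 0) 0 - 1)).erase (nums.getD leftN 0)
             else count.insert (nums.getD leftN 0) (count.getD (nums.getD leftN 0) 0 - 1))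
            (ans + ((nums.length : Int) - (R : Int))) R := by
        simp only [cgInnerA]
        rw [if_pos (by rw [hsize]; exact hcond), hy]
      have hstepAbs : aInner nums k (f + 1) R leftN ans =
          aInner nums k f R (leftN + 1) (ans + ((nums.length : Int) - (R : Int))) := by
        simp only [aInner]
        rw [if_pos hcond]
      rw [hstepA, hstepAbs]
      have hcast : ((leftN : Int) + 1) = ((leftN + 1 : Nat) : Int) := by push_cast; ring
      rw [hcast]
      obtain ⟨d', he, hi, hb1, hb2⟩ := ih (leftN + 1) _ (ans + ((nums.length : Int) - (R : Int))) R (by omega) hR hinv'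
      exact ⟨d', he, hi, by omega, hb2⟩
    · have : ¬ ((count.size : Int) > k) := by rw [hsize]; exact hcond
      simp only [cgInnerA, aInner, if_neg this, if_neg hcond]
      exact ⟨count, rfl, hinv, le_refl _, h1⟩

-- A's concrete outer loop computes the abstract outer loop
theorem outerA_corr (nums : List Int) (k : Int) (hk : 0 ≤ k) :
    ∀ (fuel R : Nat) (leftN : Nat) (count : PySem.Dict Int Int) (ans : Int),
      R + fuel = nums.length → leftN ≤ R → CtrInv count (seg nums leftN R) →
      cgOuterA nums k fuel (leftN : Int) count ans R = aOuter nums k fuel R leftN ans := by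
  intro fuel
  induction fuel with
  | zero => intro R leftN count ans _ _ _; rfl
  | succ f ih =>
    intro R leftN count ans hrf hlr hinv
    have hR : R < nums.length := by omega
    have hgrow : CtrInv (count.insert (nums.getD R 0) (count.getD (nums.getD R 0) 0 + 1))
        (seg nums leftN (R + 1)) := by
      rw [seg_append hlr hR]
      exact ctr_grow hinv _
    obtain ⟨d', he, hi, hb1, hb2⟩ :=
      innerA_corr nums k hk (nums.length + 1) leftN _ ans R (by omega) hR hgrow
    simp only [cgOuterA, aOuter, if_pos hR]
    rw [he]
    exact ih (R + 1) _ d' _ (by omega) (by omega) hi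

-- abstract B returns n - R at the first window end exceeding k distinct values
theorem bA_hit (nums : List Int) (k : Int) (l R : Nat) (hR : R < nums.length)
    (hkR : (dct nums l R : Int) ≤ k) (hkR1 : (dct nums l (R + 1) : Int) > k) :
    ∀ (fuel r : Nat), l ≤ r → r ≤ R → r + fuel = nums.length →
      bA nums k l fuel r = (nums.length : Int) - (R : Int) := by
  intro fuel
  induction fuel with
  | zero => intro r _ h2 h3; omega
  | succ f ih =>
    intro r h1 h2 h3
    by_cases hc : (dct nums l (r + 1) : Int) > k
    · have hrR : r = R := by
        by_contra hne
        have hlt : r + 1 ≤ R := by omega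
        have := dct_mono_r (nums := nums) (l := l) hlt
        have : (dct nums l (r + 1) : Int) ≤ (dct nums l R : Int) := by exact_mod_cast this
        omega
      subst hrR
      simp only [bA, if_pos hc]
    · have hne : r ≠ R := by rintro rfl; exact hc hkR1
      simp only [bA, if_neg hc]
      exact ih (r + 1) (by omega) (by omega) (by omega)

-- abstract B returns 0 when even the full suffix stays within k distinct values
theorem bA_miss (nums : List Int) (k : Int) (l : Nat)
    (h : (dct nums l nums.length : Int) ≤ k) :
    ∀ (fuel r : Nat), r + fuel = nums.length → bA nums k l fuel r = 0 := by
  intro fuel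
  induction fuel with
  | zero => intro r _; rfl
  | succ f ih =>
    intro r h3
    have hle : (dct nums l (r + 1) : Int) ≤ (dct nums l nums.length : Int) := by
      exact_mod_cast dct_mono_r (by omega : r + 1 ≤ nums.length)
    simp only [bA, if_neg (by omega : ¬ (dct nums l (r + 1) : Int) > k)]
    exact ih (r + 1) (by omega)

-- abstract A's inner loop: each start index it passes contributes exactly bVal
theorem aInner_spec (nums : List Int) (k : Int) (hk : 0 ≤ k) :
    ∀ (fuel : Nat) (leftN : Nat) (ans : Int) (R : Nat), R < nums.length →
      R + 1 ≤ leftN + fuel → leftN ≤ R + 1 → (dct nums leftN R : Int) ≤ k →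
      (dct nums (aInner nums k fuel R leftN ans).1 (R + 1) : Int) ≤ k
      ∧ leftN ≤ (aInner nums k fuel R leftN ans).1
      ∧ (aInner nums k fuel R leftN ans).1 ≤ R + 1
      ∧ (aInner nums k fuel R leftN ans).2 =
          ans + ((List.range' leftN ((aInner nums k fuel R leftN ans).1 - leftN)).map
            (bVal nums k)).sum := by
  intro fuel
  induction fuel with
  | zero =>
    intro leftN ans R hR hfuel h1 h2
    have hstep : aInner nums k 0 R leftN ans = (leftN, ans) := rfl
    have hl : leftN = R + 1 := by omega
    rw [hstep]
    refine ⟨?_, le_refl _, h1, by simp⟩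
    subst hl
    unfold dct
    rw [seg_eq_nil (Or.inl (le_refl _))]
    simpa using hk
  | succ f ih =>
    intro leftN ans R hR hfuel h1 h2
    by_cases hc : (dct nums leftN (R + 1) : Int) > k
    · have hpos : 0 < dct nums leftN (R + 1) := by omega
      obtain ⟨hlr, hln⟩ := dct_pos hpos
      have hbv : bVal nums k leftN = (nums.length : Int) - (R : Int) := by
        unfold bVal
        exact bA_hit nums k leftN R hR h2 hc (nums.length - leftN) leftN (le_refl _)
          (by omega) (by omega)
      have h2' : (dct nums (leftN + 1) R : Int) ≤ k := by
        have := dct_mono_l (nums := nums) (r := R) (by omega : leftN ≤ leftN + 1)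
        have h' : (dct nums (leftN + 1) R : Int) ≤ (dct nums leftN R : Int) := by exact_mod_cast this
        omega
      have hstep : aInner nums k (f + 1) R leftN ans =
          aInner nums k f R (leftN + 1) (ans + ((nums.length : Int) - (R : Int))) := by
        simp only [aInner]; rw [if_pos hc]
      rw [hstep]
      obtain ⟨q1, q2, q3, q4⟩ := ih (leftN + 1) (ans + ((nums.length : Int) - (R : Int))) R hR
        (by omega) (by omega) h2'
      refine ⟨q1, by omega, q3, ?_⟩
      rw [q4]
      have hsplit : (aInner nums k f R (leftN + 1) (ans + ((nums.length : Int) - (R : Int)))).1 - leftN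
          = ((aInner nums k f R (leftN + 1) (ans + ((nums.length : Int) - (R : Int)))).1 - (leftN + 1)) + 1 := by
        omega
      rw [hsplit, List.range'_succ, List.map_cons, List.sum_cons, hbv]
      ring
    · have hstep : aInner nums k (f + 1) R leftN ans = (leftN, ans) := by
        simp only [aInner]; rw [if_neg hc]
      rw [hstep]
      refine ⟨show (dct nums leftN (R + 1) : Int) ≤ k by omega, le_refl _, h1, by simp⟩

-- abstract A's outer loop: the answer is the sum of all remaining bVal contributions
theorem aOuter_spec (nums : List Int) (k : Int) (hk : 0 ≤ k) :
    ∀ (fuel R leftN : Nat) (ans : Int), R + fuel = nums.length → leftN ≤ R →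
      (dct nums leftN R : Int) ≤ k →
      aOuter nums k fuel R leftN ans =
        ans + ((List.range' leftN (nums.length - leftN)).map (bVal nums k)).sum := by
  intro fuel
  induction fuel with
  | zero =>
    intro R leftN ans hrf hlr h2
    have hRn : R = nums.length := by omega
    subst hRn
    have hzero : ∀ x ∈ (List.range' leftN (nums.length - leftN)).map (bVal nums k), x = 0 := by
      intro x hx
      obtain ⟨l, hl, rfl⟩ := List.mem_map.mp hx
      rw [List.mem_range'_1] at hl
      have hle : (dct nums l nums.length : Int) ≤ k := by
        have := dct_mono_l (nums := nums) (r := nums.length) hl.1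
        have h' : (dct nums l nums.length : Int) ≤ (dct nums leftN nums.length : Int) := by
          exact_mod_cast this
        omega
      unfold bVal
      exact bA_miss nums k l hle (nums.length - l) l (by omega)
    rw [List.sum_eq_zero hzero]
    simp [aOuter]
  | succ f ih =>
    intro R leftN ans hrf hlr h2
    have hR : R < nums.length := by omega
    obtain ⟨q1, q2, q3, q4⟩ := aInner_spec nums k hk (nums.length + 1) leftN ans R hR
      (by omega) (by omega) h2
    simp only [aOuter, if_pos hR]
    rw [ih (R + 1) _ _ (by omega) (by omega) q1, q4]
    have hsplit : List.range' leftN ((aInner nums k (nums.length + 1) R leftN ans).1 - leftN)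
        ++ List.range' (aInner nums k (nums.length + 1) R leftN ans).1
            (nums.length - (aInner nums k (nums.length + 1) R leftN ans).1)
        = List.range' leftN (nums.length - leftN) := by
      have := List.range'_append (s := leftN)
        (m := (aInner nums k (nums.length + 1) R leftN ans).1 - leftN)
        (n := nums.length - (aInner nums k (nums.length + 1) R leftN ans).1) (step := 1)
      rw [show leftN + 1 * ((aInner nums k (nums.length + 1) R leftN ans).1 - leftN)
          = (aInner nums k (nums.length + 1) R leftN ans).1 by omega] at this
      rw [show ((aInner nums k (nums.length + 1) R leftN ans).1 - leftN)
          + (nums.length - (aInner nums k (nums.length + 1) R leftN ans).1)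
          = nums.length - leftN by omega] at this
      exact this
    rw [← hsplit, List.map_append, List.sum_append]
    ring

-- B's port equals the sum of bVal over all start indices
theorem altB_sum (nums : List Int) (k : Int) :
    count_greater_alt nums k = ((List.range' 0 nums.length).map (bVal nums k)).sum := by
  unfold count_greater_alt
  rw [PySem.List.foldl_add]
  rw [zero_add, List.range_eq_range']
  congr 1
  apply List.map_congr_left
  intro l hl
  rw [List.mem_range'_1] at hl
  have : cgScanB nums k (nums.length - l) l PySem.Set.empty = bA nums k l (nums.length - l) l := by
    apply bridgeB nums k (nums.length - l) l PySem.Set.empty l (le_refl _) (by omega)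
      (by simp [PySem.Set.empty])
    intro x
    rw [seg_eq_nil (Or.inl (le_refl _))]
    simp [PySem.Set.empty]
  rw [this]
  rfl

-- ===== VERDICT (by name: the statement is the Claim_ definition above) =====
theorem count_greater_spec : Claim_equal_count_greater := by
  intro nums k _ hpre
  unfold Spec_count_greater
  by_cases hnil : nums = []
  · subst hnil
    rfl
  · have hk : 0 ≤ k := by
      rcases hpre with h | h
      · exact absurd h hnil
      · exact h
    have hinv : CtrInv PySem.Dict.empty (seg nums 0 0) := by
      refine ⟨PySem.Dict.nodup_keys_empty, ?_, ?_⟩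
      · intro x
        rw [seg_eq_nil (Or.inl (le_refl _))]
        simp [PySem.Dict.getD_empty]
      · intro x
        rw [seg_eq_nil (Or.inl (le_refl _))]
        simp [PySem.Dict.keys_empty]
    have h0 := outerA_corr nums k hk nums.length 0 0 PySem.Dict.empty 0 (by omega)
      (le_refl _) hinv
    push_cast at h0
    have hA : count_greater nums k = aOuter nums k nums.length 0 0 0 := h0
    rw [hA, aOuter_spec nums k hk nums.length 0 0 0 (by omega) (le_refl _)
      (by unfold dct; rw [seg_eq_nil (Or.inl (le_refl _))]; simpa using hk)]
    rw [altB_sum]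
    simp
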